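-- pv_equiv track=rewrite | github.com/sabhi303/NQueensGA | genetics/algorithm.py | fillEmpty
-- ===== SOURCE A (Python) =====
-- def fillEmpty(child, parent):
--     """
--     This function is a helper for
--     crossover as it fills all the empty
--     slots in child chromosomes (in our case -1)
--     with values of parent which are not present in child
--     :param child: list
--     :param parent: list
--     :return: list
--     """
--     childSz = len(child)
--     sz = len(parent)
--     for i in range(childSz):
--         for j in range(sz):
--             if child[i] == -1 and (parent[j] not in child):
--                 child[i] = parent[j]
--     return child
-- ===== SOURCE B (Python) =====
-- def fillEmpty(child, parent):
--     """
--     Fill the -1 slots of child, in order, with the parent values not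
--     already present (deduplicated, in parent order).  Mutates child in
--     place and returns it, like the original.
--     """
--     present = set(child)
--     missing = []
--     for v in parent:
--         if v not in present:
--             present.add(v)
--             missing.append(v)
--     out = []
--     k = 0
--     for x in child:
--         if x == -1 and k < len(missing):
--             out.append(missing[k])
--             k += 1
--         else:
--             out.append(x)
--     child[:] = out
--     return child
-- ===== Notes on version B (the rewrite author's own statement) =====
-- stated objective: faster
-- what changed: Replaces the triple-nested scan (for every slot, for every parent value, a full membership scan of child) by two linear passes: one pass over parent collecting the unused values into an ordered 'missing' list with a hash set of present values, and one pass over child assigning missing values to the -1 slots in order.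
import Mathlib
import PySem

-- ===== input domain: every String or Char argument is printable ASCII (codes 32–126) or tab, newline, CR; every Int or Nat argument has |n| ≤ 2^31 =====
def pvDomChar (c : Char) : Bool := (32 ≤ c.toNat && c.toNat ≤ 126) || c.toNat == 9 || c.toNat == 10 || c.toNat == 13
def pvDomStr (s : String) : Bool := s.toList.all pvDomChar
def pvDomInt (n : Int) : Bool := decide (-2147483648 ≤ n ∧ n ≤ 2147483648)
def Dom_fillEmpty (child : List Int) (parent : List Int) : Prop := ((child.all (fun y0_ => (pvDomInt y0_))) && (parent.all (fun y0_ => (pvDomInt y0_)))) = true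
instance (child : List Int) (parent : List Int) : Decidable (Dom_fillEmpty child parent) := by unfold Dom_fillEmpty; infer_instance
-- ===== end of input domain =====

-- B replaces A's triple-nested scan by two linear passes (collect missing values once, then
-- fill the -1 slots in order); both mutate child in place in Python, equal return value proved.


-- ===== PORT A =====
-- literal transliteration: for i in range(len(child)): for j in range(len(parent)):
--   if child[i] == -1 and parent[j] not in child: child[i] = parent[j]
-- (indices from range(len(..)) are always in range, so getD/set are exact here)
def fillEmpty (child : List Int) (parent : List Int) : List Int :=
  (List.range child.length).foldl
    (fun c i =>
      (List.range parent.length).foldl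
        (fun c2 j =>
          if c2.getD i 0 = -1 ∧ parent.getD j 0 ∉ c2
          then c2.set i (parent.getD j 0) else c2)
        c)
    child

-- ===== PORT B =====
def fillEmpty_alt (child : List Int) (parent : List Int) : List Int :=
  let pm := parent.foldl
    (fun (st : PySem.Set Int × List Int) v =>
      if v ∈ st.1 then st else (PySem.Set.add st.1 v, st.2 ++ [v]))
    (PySem.Set.ofList child, ([] : List Int))
  let missing := pm.2
  (child.foldl
    (fun (st : List Int × Nat) x =>
      if x = -1 ∧ st.2 < missing.length
      then (st.1 ++ [missing.getD st.2 0], st.2 + 1)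
      else (st.1 ++ [x], st.2))
    (([] : List Int), 0)).1

-- ===== PRECONDITION & SPEC =====
def Spec_fillEmpty (child : List Int) (parent : List Int) (out : List Int) : Prop := out = fillEmpty_alt child parent
instance (child : List Int) (parent : List Int) (out : List Int) : Decidable (Spec_fillEmpty child parent out) := by unfold Spec_fillEmpty; infer_instance

-- ===== CLAIM (what is proved, stated in full; the proofs are below) =====
def Claim_equal_fillEmpty : Prop := ∀ (child : List Int) (parent : List Int), Dom_fillEmpty child parent → Spec_fillEmpty child parent (fillEmpty child parent)

-- ===== LEMMAS AND PROOFS =====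

def innerStep (i : Nat) (c : List Int) (v : Int) : List Int :=
  if c.getD i 0 = -1 ∧ v ∉ c then c.set i v else c

theorem find?_ext (l : List Int) (p q : Int → Bool) (h : ∀ v ∈ l, p v = q v) : l.find? p = l.find? q := by
  induction l with
  | nil => rfl
  | cons v vs ih =>
    rw [List.find?_cons, List.find?_cons, h v (by simp)]
    split
    · rfl
    · exact ih fun w hw => h w (by simp [hw])

theorem foldl_range_getD {α : Type} (g : α → Int → α) (l : List Int) (c : α) :
    (List.range l.length).foldl (fun c j => g c (l.getD j 0)) c = l.foldl g c := by
  induction l using List.reverseRecOn generalizing c with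
  | nil => rfl
  | append_singleton l a ih =>
    simp only [List.length_append, List.length_cons, List.length_nil, Nat.zero_add,
      List.range_succ, List.foldl_append, List.foldl_cons, List.foldl_nil]
    rw [List.foldl_ext (g := fun c j => g c (l.getD j 0))
      (H := fun s j hj => by rw [List.getD_append _ _ _ _ (List.mem_range.mp hj)]),
      ih, List.getD_append_right _ _ _ _ le_rfl]
    simp

theorem inner_noop (l : List Int) (c : List Int) (i : Nat) (h : ¬ c.getD i 0 = -1) :
    l.foldl (innerStep i) c = c := by
  induction l with
  | nil => rfl
  | cons v vs ih =>
    rw [List.foldl_cons]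
    show vs.foldl (innerStep i) (innerStep i c v) = c
    rw [innerStep, if_neg (by tauto)]
    exact ih

theorem inner_char (parent : List Int) (c : List Int) (i : Nat) (hi : i < c.length) :
    parent.foldl (innerStep i) c =
      if c.getD i 0 = -1 then
        match parent.find? (fun v => decide (v ∉ c)) with
        | some v => c.set i v
        | none => c
      else c := by
  induction parent with
  | nil =>
    simp only [List.foldl_nil, List.find?_nil]
    split <;> rfl
  | cons v vs ih =>
    by_cases h1 : c.getD i 0 = -1
    · by_cases h2 : v ∈ c
      · rw [List.foldl_cons]
        show vs.foldl (innerStep i) (innerStep i c v) = _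
        rw [innerStep, if_neg (by tauto), ih,
          List.find?_cons_of_neg (p := fun v => decide (v ∉ c)) (by simp [h2])]
      · have hm : (-1 : Int) ∈ c := by
          rw [List.getD_eq_getElem _ _ hi] at h1
          rw [← h1]; exact List.getElem_mem hi
        have hv : v ≠ -1 := fun e => h2 (e ▸ hm)
        have hset : (c.set i v).getD i 0 = v := by
          rw [List.getD_eq_getElem _ _ (by simpa using hi)]
          exact List.getElem_set_self _
        rw [List.foldl_cons]
        show vs.foldl (innerStep i) (innerStep i c v) = _
        rw [innerStep, if_pos ⟨h1, h2⟩, inner_noop vs _ i (by rw [hset]; exact hv),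
          if_pos h1, List.find?_cons_of_pos (p := fun v => decide (v ∉ c)) (by simp [h2])]
    · rw [inner_noop (v :: vs) c i h1, if_neg h1]

def collectM (pres : List Int) : List Int → List Int
  | [] => []
  | v :: vs => if v ∈ pres then collectM pres vs else v :: collectM (pres ++ [v]) vs

def fillR (missing : List Int) (k : Nat) : List Int → List Int
  | [] => []
  | x :: xs =>
    if x = -1 ∧ k < missing.length then missing.getD k 0 :: fillR missing (k + 1) xs
    else x :: fillR missing k xs

def midF (parent : List Int) (done : List Int) : List Int → List Int
  | [] => done
  | x :: xs =>
    if x = -1 then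
      match parent.find? (fun v => decide (v ∉ done ++ x :: xs)) with
      | some v => midF parent (done ++ [v]) xs
      | none => midF parent (done ++ [x]) xs
    else midF parent (done ++ [x]) xs

theorem outer_char (parent : List Int) (rest : List Int) :
    ∀ done : List Int,
    (List.range' done.length rest.length).foldl (fun c i => parent.foldl (innerStep i) c)
      (done ++ rest) = midF parent done rest := by
  induction rest with
  | nil => intro done; simp [midF]
  | cons x xs ih =>
    intro done
    rw [List.length_cons, List.range'_succ, List.foldl_cons]
    rw [inner_char parent _ _ (by simp)]
    have hget : (done ++ x :: xs).getD done.length 0 = x := by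
      rw [List.getD_append_right _ _ _ _ le_rfl]; simp
    have hset : ∀ v : Int, (done ++ x :: xs).set done.length v = done ++ v :: xs := by
      intro v; simp
    have hlen : ∀ v : Int, (done ++ [v]).length = done.length + 1 := by simp
    by_cases hx : x = -1
    · rw [if_pos (by rw [hget, hx])]
      subst hx
      cases hf : parent.find? (fun v => decide (v ∉ done ++ (-1 : Int) :: xs)) with
      | some v =>
        simp only [hset v]
        have : done ++ v :: xs = (done ++ [v]) ++ xs := by simp
        rw [this, ← hlen v, ih (done ++ [v])]
        rw [midF, if_pos rfl, hf]
      | none =>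
        have : done ++ (-1 : Int) :: xs = (done ++ [(-1 : Int)]) ++ xs := by simp
        simp only []
        rw [this, ← hlen (-1), ih (done ++ [(-1 : Int)])]
        rw [midF, if_pos rfl, hf]
    · rw [if_neg (by rw [hget]; exact hx)]
      have : done ++ x :: xs = (done ++ [x]) ++ xs := by simp
      rw [this, ← hlen x, ih (done ++ [x])]
      show _ = midF parent done (x :: xs)
      rw [midF, if_neg hx]

theorem collect_fold (l : List Int) : ∀ pres acc : List Int,
    l.foldl (fun (st : PySem.Set Int × List Int) v =>
        if v ∈ st.1 then st else (PySem.Set.add st.1 v, st.2 ++ [v])) (pres, acc)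
      = (pres ++ collectM pres l, acc ++ collectM pres l) := by
  induction l with
  | nil => intro pres acc; simp [collectM]
  | cons v vs ih =>
    intro pres acc
    rw [List.foldl_cons]
    by_cases h : v ∈ pres
    · rw [if_pos h, ih, collectM, if_pos h]
    · rw [if_neg h]
      have hadd : PySem.Set.add pres v = pres ++ [v] := by simp [PySem.Set.add, h]
      rw [hadd, ih, collectM, if_neg h]
      simp

theorem fill_fold (missing : List Int) (l : List Int) : ∀ (done : List Int) (k : Nat),
    (l.foldl (fun (st : List Int × Nat) x =>
        if x = -1 ∧ st.2 < missing.length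
        then (st.1 ++ [missing.getD st.2 0], st.2 + 1)
        else (st.1 ++ [x], st.2)) (done, k)).1
      = done ++ fillR missing k l := by
  induction l with
  | nil => intro done k; simp [fillR]
  | cons x xs ih =>
    intro done k
    rw [List.foldl_cons]
    by_cases h : x = -1 ∧ k < missing.length
    · rw [if_pos h, ih, fillR, if_pos h]; simp
    · rw [if_neg h, ih, fillR, if_neg h]; simp

theorem collect_find (l : List Int) : ∀ (pres : List Int) (k : Nat),
    l.find? (fun v => decide (v ∉ pres ∧ v ∉ (collectM pres l).take k))
      = (collectM pres l)[k]? := by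
  induction l with
  | nil => intro pres k; simp [collectM]
  | cons v vs ih =>
    intro pres k
    by_cases h : v ∈ pres
    · rw [collectM, if_pos h, List.find?_cons_of_neg (by simp [h]), ih]
    · rw [collectM, if_neg h]
      cases k with
      | zero =>
        rw [List.find?_cons_of_pos (by simp [h])]
        simp
      | succ k' =>
        rw [List.take_succ_cons, List.find?_cons_of_neg (by simp), List.getElem?_cons_succ]
        rw [find?_ext vs _ (fun w => decide (w ∉ pres ++ [v] ∧ w ∉ (collectM (pres ++ [v]) vs).take k'))
          (fun w _ => by simp [List.mem_append, Bool.and_assoc]), ih]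

theorem mid_eq_fill (parent child0 : List Int) : ∀ (rest done : List Int) (k : Nat),
    (∀ v ∈ rest, v ∈ child0) →
    (∀ v : Int, v ≠ -1 →
      (v ∈ done ++ rest ↔ (v ∈ PySem.Set.ofList child0 ∨
         v ∈ (collectM (PySem.Set.ofList child0) parent).take k))) →
    midF parent done rest
      = done ++ fillR (collectM (PySem.Set.ofList child0) parent) k rest := by
  intro rest
  induction rest with
  | nil => intro done k _ _; simp [midF, fillR]
  | cons x xs ih =>
    intro done k Hsub H
    have Hsub' : ∀ v ∈ xs, v ∈ child0 := fun v hv => Hsub v (by simp [hv])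
    by_cases hx : x = -1
    · subst hx
      have hfind : parent.find? (fun v => decide (v ∉ done ++ (-1 : Int) :: xs))
          = (collectM (PySem.Set.ofList child0) parent)[k]? := by
        rw [find?_ext parent _
          (fun v => decide (v ∉ PySem.Set.ofList child0 ∧
            v ∉ (collectM (PySem.Set.ofList child0) parent).take k))]
        · exact collect_find parent (PySem.Set.ofList child0) k
        · intro v _
          by_cases hv : v = -1
          · subst hv
            have h1 : (-1 : Int) ∈ done ++ (-1 : Int) :: xs := by simp
            have h2 : (-1 : Int) ∈ PySem.Set.ofList child0 := by
              have := Hsub (-1) (by simp)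
              simpa [PySem.Set.mem_ofList] using this
            simp [h1, h2]
          · have := H v hv
            simp only [decide_eq_decide]
            rw [this]; tauto
      set M := collectM (PySem.Set.ofList child0) parent with hM
      by_cases hk : k < M.length
      · have hsome : M[k]? = some M[k] := by simp [hk]
        rw [midF, if_pos rfl, hfind, hsome]
        rw [fillR, if_pos ⟨rfl, hk⟩]
        have hgd : M.getD k 0 = M[k] := by rw [List.getD_eq_getElem _ _ hk]
        have htake : M.take (k + 1) = M.take k ++ [M[k]] := by
          rw [List.take_add_one]; simp [hk]
        have H' : ∀ v : Int, v ≠ -1 →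
            (v ∈ (done ++ [M[k]]) ++ xs ↔ (v ∈ PySem.Set.ofList child0 ∨ v ∈ M.take (k + 1))) := by
          intro v hv
          have h0 := H v hv
          rw [htake]
          simp only [List.mem_append, List.mem_cons] at h0 ⊢
          have hv' : ¬ (v = -1) := hv
          tauto
        show midF parent (done ++ [M[k]]) xs = done ++ M.getD k 0 :: fillR M (k + 1) xs
        rw [ih (done ++ [M[k]]) (k + 1) Hsub' H', hgd]
        simp
      · have hnone : M[k]? = none := List.getElem?_eq_none (by omega)
        rw [midF, if_pos rfl, hfind, hnone]
        rw [fillR, if_neg (by tauto)]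
        have : done ++ [(-1 : Int)] ++ xs = done ++ (-1 : Int) :: xs := by simp
        rw [ih (done ++ [(-1 : Int)]) k Hsub' (fun v hv => by rw [this]; exact H v hv)]
        simp
    · rw [midF, if_neg hx, fillR, if_neg (by tauto)]
      have : done ++ [x] ++ xs = done ++ x :: xs := by simp
      rw [ih (done ++ [x]) k Hsub' (fun v hv => by rw [this]; exact H v hv)]
      simp


-- ===== VERDICT (by name: the statement is the Claim_ definition above) =====
theorem fillEmpty_spec : Claim_equal_fillEmpty := by
  intro child parent _
  show fillEmpty child parent = fillEmpty_alt child parent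
  have hA : fillEmpty child parent = midF parent [] child := by
    rw [fillEmpty]
    have hb : (fun (c : List Int) (i : Nat) =>
        (List.range parent.length).foldl
          (fun c2 j => if c2.getD i 0 = -1 ∧ parent.getD j 0 ∉ c2
            then c2.set i (parent.getD j 0) else c2) c)
      = fun c i => parent.foldl (innerStep i) c := by
      funext c i
      exact foldl_range_getD (innerStep i) parent c
    rw [hb, List.range_eq_range']
    have := outer_char parent child []
    simpa using this
  have hB : fillEmpty_alt child parent
      = [] ++ fillR (collectM (PySem.Set.ofList child) parent) 0 child := by
    simp only [fillEmpty_alt, collect_fold, List.nil_append]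
    exact fill_fold _ child [] 0
  rw [hA, hB]
  exact mid_eq_fill parent child child [] 0 (fun v hv => hv)
    (fun v hv => by simp [PySem.Set.mem_ofList])
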